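-- pv_equiv track=rewrite | github.com/NNDSrinivas/job-automation-ai | backend/user_profile.py | extract_user_info
-- ===== SOURCE A (Python) =====
-- def extract_user_info(resume_text):
--     lines = resume_text.splitlines()
--     name = lines[0].strip() if lines else "Unknown"
--     email = next((line for line in lines if "@" in line), "email@example.com")
--     location = next((line for line in lines if "Newark" in line or "DE" in line), "Location Unknown")
--
--     return {
--         "name": name,
--         "email": email,
--         "location": location
--     }
-- ===== SOURCE B (Python) =====
-- def extract_user_info(resume_text):
--     # single pass over the lines instead of three independent scans
--     name = email = location = None
--     for line in resume_text.splitlines():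
--         if name is None:
--             name = line.strip()
--         if email is None and "@" in line:
--             email = line
--         if location is None and ("Newark" in line or "DE" in line):
--             location = line
--     return {
--         "name": name if name is not None else "Unknown",
--         "email": email if email is not None else "email@example.com",
--         "location": location if location is not None else "Location Unknown",
--     }
-- ===== Notes on version B (the rewrite author's own statement) =====
-- stated objective: alternative
-- what changed: Replaces the three independent first-match scans of the line list (name, first '@' line, first 'Newark'/'DE' line) with one single-pass fold that records each field at its first match.
import Mathlib
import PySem

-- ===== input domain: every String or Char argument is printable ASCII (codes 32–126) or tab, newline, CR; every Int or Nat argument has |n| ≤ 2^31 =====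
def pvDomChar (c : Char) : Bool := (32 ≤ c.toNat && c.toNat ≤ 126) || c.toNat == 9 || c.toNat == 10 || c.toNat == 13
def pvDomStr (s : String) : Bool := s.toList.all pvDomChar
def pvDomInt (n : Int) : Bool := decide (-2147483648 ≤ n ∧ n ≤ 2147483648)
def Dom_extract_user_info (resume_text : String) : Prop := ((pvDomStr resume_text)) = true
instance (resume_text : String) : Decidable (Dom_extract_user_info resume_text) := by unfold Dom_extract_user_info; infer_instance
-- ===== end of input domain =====

-- ===== PORT A =====
-- B is a single-pass fold over the lines; A makes three independent scans. Return value only.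
def pvNext (p : String → Bool) (ls : List String) (dflt : String) : String :=
  match ls with
  | [] => dflt
  | l :: rest => if p l then l else pvNext p rest dflt

def extract_user_info (resume_text : String) : List (String × String) :=
  let lines := PySem.Str.splitlines resume_text
  let name := match lines with
    | [] => "Unknown"
    | l :: _ => PySem.Str.strip l
  let email := pvNext (fun line => PySem.Str.isIn "@" line) lines "email@example.com"
  let location := pvNext (fun line => PySem.Str.isIn "Newark" line || PySem.Str.isIn "DE" line) lines "Location Unknown"
  [("name", name), ("email", email), ("location", location)]

-- ===== PORT B =====
def pvStep (st : Option String × Option String × Option String) (line : String) :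
    Option String × Option String × Option String :=
  let n := match st.1 with
    | none => some (PySem.Str.strip line)
    | some x => some x
  let e := if st.2.1.isNone && PySem.Str.isIn "@" line then some line else st.2.1
  let l := if st.2.2.isNone && (PySem.Str.isIn "Newark" line || PySem.Str.isIn "DE" line) then some line else st.2.2
  (n, e, l)

def extract_user_info_alt (resume_text : String) : List (String × String) :=
  let st := (PySem.Str.splitlines resume_text).foldl pvStep (none, none, none)
  [("name", st.1.getD "Unknown"),
   ("email", (st.2.1).getD "email@example.com"),
   ("location", (st.2.2).getD "Location Unknown")]

-- ===== PRECONDITION & SPEC =====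
def Spec_extract_user_info (resume_text : String) (out : List (String × String)) : Prop := out = extract_user_info_alt resume_text
instance (resume_text : String) (out : List (String × String)) : Decidable (Spec_extract_user_info resume_text out) := by unfold Spec_extract_user_info; infer_instance

-- ===== CLAIM (what is proved, stated in full; the proofs are below) =====
def Claim_equal_extract_user_info : Prop := ∀ (resume_text : String), Dom_extract_user_info resume_text → Spec_extract_user_info resume_text (extract_user_info resume_text)

-- ===== LEMMAS AND PROOFS =====
theorem pvStep_foldl (ls : List String) (n e l : Option String) :
    ls.foldl pvStep (n, e, l) =
      (n.orElse (fun _ => ls.head?.map PySem.Str.strip),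
       e.orElse (fun _ => ls.find? (fun line => PySem.Str.isIn "@" line)),
       l.orElse (fun _ => ls.find? (fun line => PySem.Str.isIn "Newark" line || PySem.Str.isIn "DE" line))) := by
  induction ls generalizing n e l with
  | nil => cases n <;> cases e <;> cases l <;> simp
  | cons hd tl ih =>
    simp only [List.foldl_cons, pvStep, ih]
    cases n <;> cases e <;> cases l <;>
      simp only [Option.isNone_none, Option.isNone_some, Bool.true_and, Bool.false_and,
        List.find?_cons] <;>
      cases h1 : PySem.Str.isIn "@" hd <;>
        cases h2 : (PySem.Str.isIn "Newark" hd || PySem.Str.isIn "DE" hd) <;> simp_all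

theorem pvNext_eq_find? (p : String → Bool) (ls : List String) (d : String) :
    pvNext p ls d = (ls.find? p).getD d := by
  induction ls with
  | nil => rfl
  | cons hd tl ih => simp [pvNext, List.find?]; split_ifs <;> simp_all

-- ===== VERDICT (by name: the statement is the Claim_ definition above) =====
theorem extract_user_info_spec : Claim_equal_extract_user_info := by
  intro s _
  unfold Spec_extract_user_info extract_user_info extract_user_info_alt
  simp only [pvStep_foldl, pvNext_eq_find?, Option.orElse]
  cases PySem.Str.splitlines s <;> simp
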